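-- pv_equiv track=rewrite | github.com/coandco/advent2019 | advent2019_day04.py | has_repeated_char
-- ===== SOURCE A (Python) =====
-- def has_repeated_char(num):
--     numstr = str(num)
--     previous_digit = None
--     for char in numstr:
--         if char == previous_digit:
--             return True
--         else:
--             previous_digit = char
--     return False
-- ===== SOURCE B (Python) =====
-- def has_repeated_char(num):
--     s = str(num)
--     return any(c + c in s for c in set(s))
-- ===== Notes on version B (the rewrite author's own statement) =====
-- stated objective: alternative
-- what changed: Instead of scanning the string once comparing each character to its predecessor, B asks for each distinct character of str(num) whether its doubling (c+c) occurs as a substring, delegating the detection to substring search.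
import Mathlib
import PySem

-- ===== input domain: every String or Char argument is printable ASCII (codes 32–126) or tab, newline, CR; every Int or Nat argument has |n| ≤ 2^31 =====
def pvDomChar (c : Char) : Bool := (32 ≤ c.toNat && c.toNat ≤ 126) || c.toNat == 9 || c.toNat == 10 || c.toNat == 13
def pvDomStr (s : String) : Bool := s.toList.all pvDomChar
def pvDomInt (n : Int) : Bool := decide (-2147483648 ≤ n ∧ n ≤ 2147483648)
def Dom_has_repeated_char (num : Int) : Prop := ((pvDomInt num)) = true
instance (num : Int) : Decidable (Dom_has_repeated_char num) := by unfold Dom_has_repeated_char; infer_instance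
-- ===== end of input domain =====

-- B detects a repeat by checking, for each distinct character c of str(num), whether c+c is a substring; alternative decomposition, same behaviour.

-- ===== PORT A =====
-- the for-loop with early return, carrying previous_digit : Option Char
def hasRepGo (l : List Char) (previous_digit : Option Char) : Bool :=
  match l with
  | [] => false
  | c :: rest =>
    if some c == previous_digit then true
    else hasRepGo rest (some c)

def has_repeated_char (num : Int) : Bool :=
  hasRepGo (PySem.Int.toStr num).toList none

-- ===== PORT B =====
-- any(c + c in s for c in set(s))
def has_repeated_char_alt (num : Int) : Bool :=
  let s := (PySem.Int.toStr num).toList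
  (PySem.Set.ofList s).any (fun c => PySem.Chars.isIn [c, c] s)

-- ===== PRECONDITION & SPEC =====
def Spec_has_repeated_char (num : Int) (out : Bool) : Prop := out = has_repeated_char_alt num
instance (num : Int) (out : Bool) : Decidable (Spec_has_repeated_char num out) := by unfold Spec_has_repeated_char; infer_instance

-- ===== CLAIM =====
def Claim_equal_has_repeated_char : Prop := ∀ (num : Int), Dom_has_repeated_char num → Spec_has_repeated_char num (has_repeated_char num)

-- ===== LEMMAS AND PROOFS =====
theorem hasRepGo_some (l : List Char) (p : Char) :
    hasRepGo l (some p) = true ↔ ∃ c, [c, c] <:+: (p :: l) := by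
  induction l generalizing p with
  | nil =>
    simp only [hasRepGo]
    constructor
    · intro h; exact absurd h (by simp)
    · rintro ⟨c, h⟩
      have := h.length_le
      simp at this
  | cons c rest ih =>
    simp only [hasRepGo]
    by_cases h : c = p
    · subst h
      rw [if_pos (by simp : (some c == some c) = true)]
      constructor
      · intro _; exact ⟨c, ⟨[], rest, by simp⟩⟩
      · intro _; rfl
    · rw [if_neg (by simp [h]), ih]
      constructor
      · rintro ⟨d, hd⟩; exact ⟨d, hd.trans (List.suffix_cons p (c :: rest)).isInfix⟩
      · rintro ⟨d, hd⟩
        rcases List.infix_cons_iff.mp hd with hpre | hinf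
        · rcases hpre with ⟨t, ht⟩
          simp only [List.cons_append] at ht
          obtain ⟨h1, h2⟩ := List.cons.injEq .. ▸ ht
          injection ht with h1 ht2
          injection ht2 with h2 _
          exact absurd (h1.symm.trans h2) (Ne.symm h)
        · exact ⟨d, hinf⟩

theorem hasRepGo_none (l : List Char) :
    hasRepGo l none = true ↔ ∃ c, [c, c] <:+: l := by
  cases l with
  | nil =>
    simp only [hasRepGo]
    constructor
    · intro h; exact absurd h (by simp)
    · rintro ⟨c, h⟩
      have := h.length_le; simp at this
  | cons c rest =>
    show (if some c == (none : Option Char) then true else hasRepGo rest (some c)) = true ↔ _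
    rw [if_neg (by simp : ¬ (some c == (none : Option Char)) = true)]
    exact hasRepGo_some rest c

theorem mem_of_double_infix {c : Char} {l : List Char} (h : [c, c] <:+: l) : c ∈ l :=
  h.subset (by simp)

theorem altB_iff (l : List Char) :
    ((PySem.Set.ofList l).any (fun c => PySem.Chars.isIn [c, c] l) = true) ↔
      ∃ c, [c, c] <:+: l := by
  rw [List.any_eq_true]
  constructor
  · rintro ⟨c, _, hc⟩
    exact ⟨c, (PySem.Chars.isIn_iff_infix _ _).mp hc⟩
  · rintro ⟨c, hc⟩
    exact ⟨c, (PySem.Set.mem_ofList _ _).mpr (mem_of_double_infix hc),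
      (PySem.Chars.isIn_iff_infix _ _).mpr hc⟩

-- ===== VERDICT =====
theorem has_repeated_char_spec : Claim_equal_has_repeated_char := by
  intro num _
  unfold Spec_has_repeated_char has_repeated_char has_repeated_char_alt
  have h1 := hasRepGo_none (PySem.Int.toStr num).toList
  have h2 := altB_iff (PySem.Int.toStr num).toList
  cases hb : hasRepGo (PySem.Int.toStr num).toList none with
  | false =>
    symm
    rw [← Bool.not_eq_true, h2]
    intro hc
    rw [h1.mpr hc] at hb
    exact absurd hb (by simp)
  | true =>
    exact (h2.mpr (h1.mp hb)).symm
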